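-- pv_equiv track=rewrite | github.com/KafkaesqueWA/PokerRFID | mockup_control.py | makeRoles
-- ===== SOURCE A (Python) =====
-- def makeRoles(num):
--     roleList = []
--     for i in range(0,num):
--         if i == 0:
--             roleList.append("D")
--         elif i == 1:
--             roleList.append("SB")
--         elif i == 2:
--             roleList.append("BB")
--         elif i == 3:
--             roleList.append("UTG")
--         elif i == num-1:
--             roleList.append("C")
--         elif i == num-2:
--             roleList.append("HJ")
--         elif i == num-3:
--             roleList.append("LJ")
--         else:
--             roleList.append("UTG + " +  str(i-3))
--     return roleList
-- ===== SOURCE B (Python) =====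
-- def makeRoles(num):
--     # Two-phase build: default labels first, then patch fixed positions.
--     roles = ["UTG + " + str(i - 3) for i in range(num)]
--     for i, lab in enumerate(["D", "SB", "BB", "UTG"]):
--         if i < num:
--             roles[i] = lab
--     for off, lab in ((1, "C"), (2, "HJ"), (3, "LJ")):
--         idx = num - off
--         if idx >= 4:
--             roles[idx] = lab
--     return roles
-- ===== Notes on version B (the rewrite author's own statement) =====
-- stated objective: alternative
-- what changed: Replaces the single seven-way priority if-chain inside the loop by a two-phase build: a comprehension producing the default 'UTG + k' labels, then in-place patches of the first four fixed positions and of the guarded last-three positions.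
import Mathlib
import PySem

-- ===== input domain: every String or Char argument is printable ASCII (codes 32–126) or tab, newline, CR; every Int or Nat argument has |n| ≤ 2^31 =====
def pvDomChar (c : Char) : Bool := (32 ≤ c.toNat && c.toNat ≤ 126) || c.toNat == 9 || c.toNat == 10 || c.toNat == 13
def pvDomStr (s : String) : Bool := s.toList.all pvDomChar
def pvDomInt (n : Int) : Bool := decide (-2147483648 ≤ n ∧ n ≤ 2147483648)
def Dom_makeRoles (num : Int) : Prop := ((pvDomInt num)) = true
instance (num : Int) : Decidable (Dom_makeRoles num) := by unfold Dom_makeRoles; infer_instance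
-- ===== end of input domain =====

-- B builds the same list in two phases (defaults, then patches) instead of A's priority if-chain; equivalence is exact (return value; no mutation visible to callers).

-- ===== PORT A =====
def makeRoles (num : Int) : List String :=
  (PySem.List.pyRange 0 num 1).foldl (fun roleList i =>
    if i = 0 then roleList ++ ["D"]
    else if i = 1 then roleList ++ ["SB"]
    else if i = 2 then roleList ++ ["BB"]
    else if i = 3 then roleList ++ ["UTG"]
    else if i = num - 1 then roleList ++ ["C"]
    else if i = num - 2 then roleList ++ ["HJ"]
    else if i = num - 3 then roleList ++ ["LJ"]
    else roleList ++ ["UTG + " ++ PySem.Int.toStr (i - 3)]) []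

-- ===== PORT B =====
def makeRoles_alt (num : Int) : List String :=
  let roles := (PySem.List.pyRange 0 num 1).map (fun i => "UTG + " ++ PySem.Int.toStr (i - 3))
  let roles := (PySem.List.enumerate ["D", "SB", "BB", "UTG"]).foldl
    (fun rs p => if p.1 < num then PySem.List.pySetD rs p.1 p.2 else rs) roles
  let roles := [((1 : Int), "C"), (2, "HJ"), (3, "LJ")].foldl
    (fun rs p => if 4 ≤ num - p.1 then PySem.List.pySetD rs (num - p.1) p.2 else rs) roles
  roles

-- ===== PRECONDITION & SPEC =====
def Spec_makeRoles (num : Int) (out : List String) : Prop := out = makeRoles_alt num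
instance (num : Int) (out : List String) : Decidable (Spec_makeRoles num out) := by unfold Spec_makeRoles; infer_instance

-- ===== CLAIM (what is proved, stated in full; the proofs are below) =====
def Claim_equal_makeRoles : Prop := ∀ (num : Int), Dom_makeRoles num → Spec_makeRoles num (makeRoles num)

-- ===== LEMMAS AND PROOFS =====

def pvF (num i : Int) : String :=
  if i = 0 then "D"
  else if i = 1 then "SB"
  else if i = 2 then "BB"
  else if i = 3 then "UTG"
  else if i = num - 1 then "C"
  else if i = num - 2 then "HJ"
  else if i = num - 3 then "LJ"
  else "UTG + " ++ PySem.Int.toStr (i - 3)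

theorem A_eq_map (num : Int) :
    makeRoles num = (PySem.List.pyRange 0 num 1).map (pvF num) := by
  unfold makeRoles
  have h : (fun (roleList : List String) (i : Int) =>
      if i = 0 then roleList ++ ["D"]
      else if i = 1 then roleList ++ ["SB"]
      else if i = 2 then roleList ++ ["BB"]
      else if i = 3 then roleList ++ ["UTG"]
      else if i = num - 1 then roleList ++ ["C"]
      else if i = num - 2 then roleList ++ ["HJ"]
      else if i = num - 3 then roleList ++ ["LJ"]
      else roleList ++ ["UTG + " ++ PySem.Int.toStr (i - 3)])
      = fun roleList i => roleList ++ [pvF num i] := by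
    funext acc i
    simp only [pvF]
    split_ifs <;> rfl
  rw [h, PySem.List.foldl_append_singleton_eq_map, List.nil_append]

set_option maxHeartbeats 2000000 in
theorem main (num : Int) : makeRoles num = makeRoles_alt num := by
  by_cases hle : num ≤ 7
  · by_cases h0 : num ≤ 0
    · rw [A_eq_map, PySem.List.pyRange_one_eq_nil (by omega)]
      unfold makeRoles_alt
      rw [PySem.List.pyRange_one_eq_nil (by omega)]
      simp only [List.map_nil, PySem.List.enumerate_cons, PySem.List.enumerate_nil,
        List.foldl_cons, List.foldl_nil]
      rw [if_neg (by omega : ¬ (0:Int) < num), if_neg (by omega : ¬ (0:Int)+1 < num),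
          if_neg (by omega : ¬ (0:Int)+1+1 < num), if_neg (by omega : ¬ (0:Int)+1+1+1 < num),
          if_neg (by omega : ¬ (4:Int) ≤ num - 1), if_neg (by omega : ¬ (4:Int) ≤ num - 2),
          if_neg (by omega : ¬ (4:Int) ≤ num - 3)]
    · have : num = ((num.toNat : Int)) := by omega
      rw [this]
      have h7 : num.toNat ≤ 7 := by omega
      interval_cases h : num.toNat <;> decide
  · -- num ≥ 8
    have hn : (8:Int) ≤ num := by omega
    rw [A_eq_map]
    unfold makeRoles_alt
    simp only [PySem.List.enumerate_cons, PySem.List.enumerate_nil, List.foldl_cons, List.foldl_nil]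
    rw [if_pos (by omega : (0:Int) < num), if_pos (by omega : (0:Int)+1 < num),
        if_pos (by omega : (0:Int)+1+1 < num), if_pos (by omega : (0:Int)+1+1+1 < num),
        if_pos (by omega : (4:Int) ≤ num - 1), if_pos (by omega : (4:Int) ≤ num - 2),
        if_pos (by omega : (4:Int) ≤ num - 3)]
    rw [PySem.List.pySetD_of_nonneg _ "D" (by omega), PySem.List.pySetD_of_nonneg _ "SB" (by omega),
        PySem.List.pySetD_of_nonneg _ "BB" (by omega), PySem.List.pySetD_of_nonneg _ "UTG" (by omega),
        PySem.List.pySetD_of_nonneg _ "C" (by omega), PySem.List.pySetD_of_nonneg _ "HJ" (by omega),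
        PySem.List.pySetD_of_nonneg _ "LJ" (by omega)]
    apply List.ext_getElem
    · simp only [List.length_set, List.length_map, PySem.List.length_pyRange_one, Int.sub_zero]
    · intro i h1 h2
      have hi : i < num.toNat := by
        simp only [List.length_map, PySem.List.length_pyRange_one, Int.sub_zero] at h1
        exact h1
      simp only [List.getElem_set, List.getElem_map, PySem.List.getElem_pyRange_one, zero_add]
      unfold pvF
      split_ifs <;> first | rfl | omega

-- ===== VERDICT (by name: the statement is the Claim_ definition above) =====
theorem makeRoles_spec : Claim_equal_makeRoles := by
  intro num _
  exact main num
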